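-- pv_equiv track=rewrite | github.com/amathislab/DLC2action | examples/Atari-head-DLC2Action/code/base_classifier.py | separate_split_data
-- ===== SOURCE A (Python) =====
-- def separate_split_data(split_data):
--
--     chapters = 0
--     training_list = []
--     validation_list = []
--     testing_list = []
--     for elem in split_data:
--         if chapters == 0:
--             if "Validation" in elem:
--                 chapters += 1
--                 continue
--             training_list.append(elem)
--
--         elif chapters == 1:
--             if "Testing" in elem:
--                 chapters += 1
--                 continue
--             validation_list.append(elem)
--         elif chapters == 2:
--             testing_list.append(elem)
--
--     validation_list = validation_list[:-1]
--     training_list = training_list[1:-1]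
--
--     validation_list = [elem[:-2] for elem in validation_list]
--     training_list = [elem[:-2] for elem in training_list]
--     testing_list = [elem[:-2] for elem in testing_list]
--
--     return training_list, validation_list, testing_list
-- ===== SOURCE B (Python) =====
-- def separate_split_data(split_data):
--     data = list(split_data)
--
--     def split_at_marker(lst, marker):
--         for k, elem in enumerate(lst):
--             if marker in elem:
--                 return lst[:k], lst[k + 1:]
--         return lst, []
--
--     training, rest = split_at_marker(data, "Validation")
--     validation, testing = split_at_marker(rest, "Testing")
--     return ([e[:-2] for e in training[1:-1]],
--             [e[:-2] for e in validation[:-1]],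
--             [e[:-2] for e in testing])
-- ===== Notes on version B (the rewrite author's own statement) =====
-- stated objective: simpler
-- what changed: Replaces A's single-pass three-phase state machine (a chapters counter with three accumulator lists) by a small reusable helper that cuts a list at the first line containing a marker, applied twice (Validation, then Testing), followed by the same slice trims.
import Mathlib
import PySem

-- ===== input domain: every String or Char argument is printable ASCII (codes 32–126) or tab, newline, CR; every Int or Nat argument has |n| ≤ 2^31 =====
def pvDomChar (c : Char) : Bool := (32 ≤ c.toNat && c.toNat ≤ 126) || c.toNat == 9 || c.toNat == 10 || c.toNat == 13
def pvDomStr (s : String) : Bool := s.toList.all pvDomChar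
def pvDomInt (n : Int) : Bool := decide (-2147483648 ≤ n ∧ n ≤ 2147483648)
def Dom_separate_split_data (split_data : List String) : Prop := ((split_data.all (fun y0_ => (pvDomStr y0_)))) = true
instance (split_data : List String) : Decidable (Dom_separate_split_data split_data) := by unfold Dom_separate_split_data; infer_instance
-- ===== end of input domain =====

-- B replaces A's three-phase state machine (a fold carrying a `chapters` counter and three
-- accumulators) by a reusable helper that cuts a list at the first marker line, applied twice;
-- objective: simpler.

-- ===== PORT A =====
-- one loop step of A: dispatch on `chapters`, the `continue` branches only bump `chapters`
def sepStep (st : Int × List String × List String × List String) (elem : String) :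
    Int × List String × List String × List String :=
  match st with
  | (chapters, t, v, te) =>
    if chapters = 0 then
      if PySem.Str.isIn "Validation" elem then (chapters + 1, t, v, te)
      else (chapters, t ++ [elem], v, te)
    else if chapters = 1 then
      if PySem.Str.isIn "Testing" elem then (chapters + 1, t, v, te)
      else (chapters, t, v ++ [elem], te)
    else if chapters = 2 then (chapters, t, v, te ++ [elem])
    else (chapters, t, v, te)

def separate_split_data (split_data : List String) : List String × List String × List String :=
  match split_data.foldl sepStep (0, [], [], []) with
  | (_, training_list, validation_list, testing_list) =>
    let validation_list := PySem.List.slice validation_list none (some (-1))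
    let training_list := PySem.List.slice training_list (some 1) (some (-1))
    (training_list.map (fun elem => PySem.Str.slice elem none (some (-2))),
     validation_list.map (fun elem => PySem.Str.slice elem none (some (-2))),
     testing_list.map (fun elem => PySem.Str.slice elem none (some (-2))))

-- ===== PORT B =====
-- index of the first element containing `marker` (the `enumerate` scan of Source B)
def findMarker (lst : List String) (marker : String) : Option Nat :=
  match lst with
  | [] => none
  | elem :: rest =>
    if PySem.Str.isIn marker elem then some 0
    else (findMarker rest marker).map (· + 1)

-- Source B's split_at_marker: lst[:k], lst[k+1:] — k is a nonnegative in-range index,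
-- so the Python slices are exactly take/drop
def splitAtMarker (lst : List String) (marker : String) : List String × List String :=
  match findMarker lst marker with
  | some k => (lst.take k, lst.drop (k + 1))
  | none => (lst, [])

def separate_split_data_alt (split_data : List String) : List String × List String × List String :=
  let tr := splitAtMarker split_data "Validation"
  let vt := splitAtMarker tr.2 "Testing"
  ((PySem.List.slice tr.1 (some 1) (some (-1))).map
      (fun e => PySem.Str.slice e none (some (-2))),
   (PySem.List.slice vt.1 none (some (-1))).map
      (fun e => PySem.Str.slice e none (some (-2))),
   vt.2.map (fun e => PySem.Str.slice e none (some (-2))))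

-- ===== PRECONDITION & SPEC =====
def Spec_separate_split_data (split_data : List String) (out : List String × List String × List String) : Prop := out = separate_split_data_alt split_data
instance (split_data : List String) (out : List String × List String × List String) : Decidable (Spec_separate_split_data split_data out) := by unfold Spec_separate_split_data; infer_instance

-- ===== CLAIM (what is proved, stated in full; the proofs are below) =====
def Claim_equal_separate_split_data : Prop := ∀ (split_data : List String), Dom_separate_split_data split_data → Spec_separate_split_data split_data (separate_split_data split_data)

-- ===== LEMMAS AND PROOFS =====

theorem splitAtMarker_nil (m : String) : splitAtMarker [] m = ([], []) := rfl

theorem findMarker_cons (e : String) (rest : List String) (m : String) :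
    findMarker (e :: rest) m =
      if PySem.Str.isIn m e then some 0 else (findMarker rest m).map (· + 1) := rfl

theorem splitAtMarker_cons (e : String) (rest : List String) (m : String) :
    splitAtMarker (e :: rest) m =
      if PySem.Str.isIn m e then ([], rest)
      else (e :: (splitAtMarker rest m).1, (splitAtMarker rest m).2) := by
  by_cases h : PySem.Str.isIn m e
  · simp only [splitAtMarker, findMarker_cons, h, if_true]
    rfl
  · simp only [splitAtMarker, findMarker_cons, h, if_false, Bool.false_eq_true]
    cases hf : findMarker rest m with
    | none => simp
    | some k => simp

theorem phase2 (xs : List String) (c : Int) (t v te : List String) (hc : c = 2) :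
    xs.foldl sepStep (c, t, v, te) = (2, t, v, te ++ xs) := by
  subst hc
  induction xs generalizing te with
  | nil => simp
  | cons e rest ih =>
    simp only [List.foldl_cons, sepStep]
    norm_num
    rw [ih]
    simp

theorem phase1 (xs : List String) (t v te : List String) :
    (xs.foldl sepStep (1, t, v, te)).2 =
      (t, v ++ (splitAtMarker xs "Testing").1, te ++ (splitAtMarker xs "Testing").2) := by
  induction xs generalizing v with
  | nil => simp [splitAtMarker_nil]
  | cons e rest ih =>
    rw [splitAtMarker_cons]
    by_cases h : PySem.Str.isIn "Testing" e
    · simp only [List.foldl_cons, sepStep, h, if_true]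
      norm_num
      rw [phase2 rest 2 t v te rfl]
    · simp only [List.foldl_cons, sepStep, h, if_false, Bool.false_eq_true]
      norm_num
      rw [ih (v ++ [e])]
      simp

theorem phase0 (xs : List String) (t v te : List String) :
    (xs.foldl sepStep (0, t, v, te)).2 =
      (t ++ (splitAtMarker xs "Validation").1,
       v ++ (splitAtMarker (splitAtMarker xs "Validation").2 "Testing").1,
       te ++ (splitAtMarker (splitAtMarker xs "Validation").2 "Testing").2) := by
  induction xs generalizing t with
  | nil => simp [splitAtMarker_nil]
  | cons e rest ih =>
    rw [splitAtMarker_cons]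
    by_cases h : PySem.Str.isIn "Validation" e
    · simp only [List.foldl_cons, sepStep, h, if_true]
      norm_num
      rw [phase1 rest t v te]
    · simp only [List.foldl_cons, sepStep, h, if_false, Bool.false_eq_true]
      norm_num
      rw [ih (t ++ [e])]
      simp

-- ===== VERDICT (by name: the statement is the Claim_ definition above) =====
theorem separate_split_data_spec : Claim_equal_separate_split_data := by
  intro split_data _
  unfold Spec_separate_split_data separate_split_data separate_split_data_alt
  have h := phase0 split_data [] [] []
  rcases hf : split_data.foldl sepStep (0, [], [], []) with ⟨c, t, v, te⟩
  rw [hf] at h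
  simp only [List.nil_append] at h
  injection h with h1 h2
  injection h2 with h3 h4
  subst h1 h3 h4
  rfl
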